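-- pv_equiv track=rewrite | github.com/parvathy-shani/Dynamic-Timetable-Generator-Algorithm-Implementation | Hard_constraints.py | hc_class_conflict
-- ===== SOURCE A (Python) =====
-- def hc_class_conflict(schedule):
--     violation_count = 0
--     for p1 in schedule:
--         for p2 in schedule:
--             if p1 != p2:
--                 if p1[1][2] == p2[1][2] and p1[0][0] == p2[0][0]:
--                     violation_count += 1
--     return violation_count
-- ===== SOURCE B (Python) =====
-- def hc_class_conflict(schedule):
--     # count copies of each exact entry value (no indexing needed)
--     val_counts = {}
--     for p in schedule:
--         v = (tuple(p[0]), tuple(p[1]))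
--         val_counts[v] = val_counts.get(v, 0) + 1
--     if len(val_counts) <= 1:
--         return 0  # no two distinct entries, so no conflict
--     # how many distinct entry values occupy each timeslot
--     slot_counts = {}
--     for v in val_counts:
--         t = v[1][2]
--         slot_counts[t] = slot_counts.get(t, 0) + 1
--     # entries whose timeslot holds >= 2 distinct values can conflict:
--     # count them per (class, timeslot) key; 'extra' removes same-value pairs
--     key_counts = {}
--     extra = 0
--     for p in schedule:
--         v = (tuple(p[0]), tuple(p[1]))
--         if slot_counts[v[1][2]] < 2:
--             continue
--         k = (v[0][0], v[1][2])
--         key_counts[k] = key_counts.get(k, 0) + 1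
--         extra += val_counts[v]
--     return sum(m * m for m in key_counts.values()) - extra
-- ===== Notes on version B (the rewrite author's own statement) =====
-- stated objective: faster
-- what changed: Replaced the quadratic all-pairs double loop by linear counting passes: a hash-map count of copies per exact entry value, a count of distinct values per timeslot to know which entries can conflict, then per-(class,timeslot) group counts, returning sum of squared group sizes minus the same-value pair correction.
import Mathlib
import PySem

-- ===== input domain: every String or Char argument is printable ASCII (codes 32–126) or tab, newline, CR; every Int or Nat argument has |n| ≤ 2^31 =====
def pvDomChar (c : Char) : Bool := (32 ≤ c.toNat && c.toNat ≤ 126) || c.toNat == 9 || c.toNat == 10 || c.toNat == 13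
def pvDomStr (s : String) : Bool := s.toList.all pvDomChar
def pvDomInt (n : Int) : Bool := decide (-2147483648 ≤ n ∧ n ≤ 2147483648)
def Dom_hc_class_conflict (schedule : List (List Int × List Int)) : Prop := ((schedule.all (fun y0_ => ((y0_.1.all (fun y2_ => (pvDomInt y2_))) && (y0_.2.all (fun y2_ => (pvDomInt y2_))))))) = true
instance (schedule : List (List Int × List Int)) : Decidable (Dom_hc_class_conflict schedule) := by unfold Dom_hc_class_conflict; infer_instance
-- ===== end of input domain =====

-- B replaces A's O(n^2) all-pairs double loop by counting passes over hash maps (faster: asymptotic).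


-- ===== PORT A =====
def hc_class_conflict (schedule : List (List Int × List Int)) : Int :=
  schedule.foldl (fun violation_count p1 =>
    schedule.foldl (fun vc p2 =>
      if p1 ≠ p2 then
        if PySem.List.pyGetD p1.2 2 0 = PySem.List.pyGetD p2.2 2 0 ∧
           PySem.List.pyGetD p1.1 0 0 = PySem.List.pyGetD p2.1 0 0
        then vc + 1 else vc
      else vc) violation_count) 0

-- ===== PORT B =====
def hc_class_conflict_alt (schedule : List (List Int × List Int)) : Int :=
  let val_counts : PySem.Dict (List Int × List Int) Int :=
    schedule.foldl (fun d p => d.insert p (d.getD p 0 + 1)) PySem.Dict.empty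
  if val_counts.size ≤ 1 then 0
  else
    let slot_counts : PySem.Dict Int Int :=
      val_counts.keys.foldl (fun d v =>
        d.insert (PySem.List.pyGetD v.2 2 0) (d.getD (PySem.List.pyGetD v.2 2 0) 0 + 1))
        PySem.Dict.empty
    let kc_extra : PySem.Dict (Int × Int) Int × Int :=
      schedule.foldl (fun acc p =>
        if slot_counts.getD (PySem.List.pyGetD p.2 2 0) 0 < 2 then acc
        else (acc.1.insert (PySem.List.pyGetD p.1 0 0, PySem.List.pyGetD p.2 2 0)
                (acc.1.getD (PySem.List.pyGetD p.1 0 0, PySem.List.pyGetD p.2 2 0) 0 + 1),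
              acc.2 + val_counts.getD p 0))
        (PySem.Dict.empty, 0)
    (kc_extra.1.values.map (fun m => m * m)).sum - kc_extra.2

-- ===== PRECONDITION & SPEC =====
-- Pre_ is exactly the inputs on which both Pythons return: whenever two value-distinct entries
-- exist, the positions the programs index must be in range (p[1] has length >= 3, and p[0] nonempty
-- when the timeslot comparison can succeed against a distinct entry); outside it both raise IndexError.
def Pre_hc_class_conflict (schedule : List (List Int × List Int)) : Prop :=
  ∀ x ∈ schedule, ∀ y ∈ schedule, x ≠ y →
    3 ≤ x.2.length ∧ 3 ≤ y.2.length ∧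
      (PySem.List.pyGetD x.2 2 0 = PySem.List.pyGetD y.2 2 0 → x.1 ≠ [] ∧ y.1 ≠ [])
instance (schedule : List (List Int × List Int)) : Decidable (Pre_hc_class_conflict schedule) := by
  unfold Pre_hc_class_conflict; infer_instance
def pvWitness_hc_class_conflict : (List (List Int × List Int)) :=
  [([1], [0, 0, 5]), ([2], [0, 0, 5]), ([1], [0, 0, 5])]
def Spec_hc_class_conflict (schedule : List (List Int × List Int)) (out : Int) : Prop := out = hc_class_conflict_alt schedule
instance (schedule : List (List Int × List Int)) (out : Int) : Decidable (Spec_hc_class_conflict schedule out) := by unfold Spec_hc_class_conflict; infer_instance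

-- ===== CLAIM (what is proved, stated in full; the proofs are below) =====
def Claim_equal_hc_class_conflict : Prop := ∀ (schedule : List (List Int × List Int)), Dom_hc_class_conflict schedule → Pre_hc_class_conflict schedule → Spec_hc_class_conflict schedule (hc_class_conflict schedule)

-- ===== LEMMAS AND PROOFS =====

-- the timeslot and the (class, timeslot) key the programs compare on
def pvSlot (p : List Int × List Int) : Int := PySem.List.pyGetD p.2 2 0
def pvKey (p : List Int × List Int) : Int × Int :=
  (PySem.List.pyGetD p.1 0 0, PySem.List.pyGetD p.2 2 0)

-- B's guard: p's timeslot is occupied by at least two distinct entry values of s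
def pvKept (s : List (List Int × List Int)) (p : List Int × List Int) : Bool :=
  !(decide (((((PySem.Set.ofList s).map pvSlot).count (pvSlot p) : Int)) < 2))

-- A's inner loop adds, to the accumulator, the number of entries ≠ p1 sharing p1's key
lemma pv_inner (s : List (List Int × List Int)) (p1 : List Int × List Int) (acc : Int) :
    s.foldl (fun vc p2 =>
      if p1 ≠ p2 then
        if PySem.List.pyGetD p1.2 2 0 = PySem.List.pyGetD p2.2 2 0 ∧
           PySem.List.pyGetD p1.1 0 0 = PySem.List.pyGetD p2.1 0 0
        then vc + 1 else vc
      else vc) acc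
    = acc + (s.countP (fun p2 => decide (pvKey p2 = pvKey p1) && (p1 != p2)) : Int) := by
  induction s generalizing acc with
  | nil => simp
  | cons h t ih =>
    simp only [List.foldl_cons, List.countP_cons, ih]
    by_cases h1 : p1 = h
    · simp [h1, pvKey]
    · by_cases h2 : pvKey h = pvKey p1
      · have : PySem.List.pyGetD p1.2 2 0 = PySem.List.pyGetD h.2 2 0 ∧
               PySem.List.pyGetD p1.1 0 0 = PySem.List.pyGetD h.1 0 0 := by
          simp only [pvKey, Prod.mk.injEq] at h2
          exact ⟨h2.2.symm, h2.1.symm⟩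
        simp [h1, h2, this]
        ring
      · have : ¬ (PySem.List.pyGetD p1.2 2 0 = PySem.List.pyGetD h.2 2 0 ∧
               PySem.List.pyGetD p1.1 0 0 = PySem.List.pyGetD h.1 0 0) := by
          simp only [pvKey, Prod.mk.injEq] at h2
          intro hc; exact h2 ⟨hc.2.symm, hc.1.symm⟩
        simp [h1, h2, this]

-- A is the per-entry sum of those counts
lemma pv_outer (s t : List (List Int × List Int)) (acc : Int) :
    t.foldl (fun violation_count p1 =>
      s.foldl (fun vc p2 =>
        if p1 ≠ p2 then
          if PySem.List.pyGetD p1.2 2 0 = PySem.List.pyGetD p2.2 2 0 ∧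
             PySem.List.pyGetD p1.1 0 0 = PySem.List.pyGetD p2.1 0 0
          then vc + 1 else vc
        else vc) violation_count) acc
    = acc + (t.map (fun p1 =>
        (s.countP (fun p2 => decide (pvKey p2 = pvKey p1) && (p1 != p2)) : Int))).sum := by
  simp only [pv_inner]
  rw [PySem.List.foldl_add]

lemma pv_A_char (s : List (List Int × List Int)) :
    hc_class_conflict s
    = (s.map (fun p1 =>
        (s.countP (fun p2 => decide (pvKey p2 = pvKey p1) && (p1 != p2)) : Int))).sum := by
  unfold hc_class_conflict
  rw [pv_outer]
  simp

-- pointwise: counting key-equal-and-different = key-equal minus value-equal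
lemma pv_pointwise (s : List (List Int × List Int)) (p1 : List Int × List Int) :
    (s.countP (fun p2 => decide (pvKey p2 = pvKey p1) && (p1 != p2)) : Int)
    = (s.countP (fun p2 => decide (pvKey p2 = pvKey p1))) - (s.count p1 : Int) := by
  induction s with
  | nil => simp
  | cons h t ih =>
    simp only [List.countP_cons, List.count_cons]
    by_cases h1 : p1 = h
    · have e0 : (p1 != h) = false := by subst h1; simp
      have e2 : decide (pvKey h = pvKey p1) = true := by subst h1; simp
      have e3 : (h == p1) = true := by subst h1; simp
      simp only [e0, e2, e3, Bool.and_false, if_true]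
      push_cast
      omega
    · have e3 : (h == p1) = false := by
        simp only [beq_eq_false_iff_ne, Ne]
        exact fun hc => h1 hc.symm
      have e4 : (p1 != h) = true := by simp [bne_iff_ne]; exact h1
      have e1 : (decide (pvKey h = pvKey p1) && (p1 != h)) = decide (pvKey h = pvKey p1) := by
        rw [e4, Bool.and_true]
      simp only [e1, e3]
      by_cases h2 : pvKey h = pvKey p1 <;>
        simp only [h2, decide_true, decide_false, if_true] <;> (push_cast; omega)

-- regrouping: a count-weighted sum over the distinct elements is the plain sum over the list
lemma pv_regroup {β : Type} [BEq β] [LawfulBEq β] [DecidableEq β] (L : List β) (w : β → Int) :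
    ((PySem.Set.ofList L).map (fun k => (L.count k : Int) * w k)).sum = (L.map w).sum := by
  have hcnt : ∀ k : β, L.count k = @List.count β instBEqOfDecidableEq k L := fun k => by
    simp only [List.count_eq_countP]
    exact List.countP_congr (fun a _ => by simp)
  simp only [hcnt]
  have hnd : (PySem.Set.ofList L).Nodup := PySem.Set.nodup_ofList L
  have hfin : (PySem.Set.ofList L).toFinset = L.toFinset := by
    ext x
    simp [List.mem_toFinset, PySem.Set.mem_ofList]
  calc ((PySem.Set.ofList L).map (fun k => ((@List.count β instBEqOfDecidableEq k L : Nat) : Int) * w k)).sum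
      = (PySem.Set.ofList L).toFinset.sum (fun k => ((@List.count β instBEqOfDecidableEq k L : Nat) : Int) * w k) :=
        (List.sum_toFinset _ hnd).symm
    _ = L.toFinset.sum (fun k => ((@List.count β instBEqOfDecidableEq k L : Nat) : Int) * w k) := by rw [hfin]
    _ = (L.map w).sum := by
        rw [Finset.sum_list_map_count]
        simp

-- subtraction distributes over the map-sum
lemma pv_sum_sub {β : Type} (l : List β) (f g : β → Int) :
    (l.map (fun x => f x - g x)).sum = (l.map f).sum - (l.map g).sum := by
  induction l with
  | nil => simp
  | cons h t ih => simp [ih]; ring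

lemma pv_count_map (s : List (List Int × List Int)) (x : List Int × List Int) :
    (s.map pvKey).count (pvKey x) = s.countP (fun y => decide (pvKey y = pvKey x)) := by
  simp only [List.count_eq_countP, List.countP_map]
  exact List.countP_congr (fun a _ => by
    simp only [Function.comp_apply, beq_iff_eq, decide_eq_true_eq])

-- a loop with a guarded pair of accumulators is two guarded loops
lemma pv_foldl_if_prod {α β γ : Type} (l : List γ) (c : γ → Prop) [DecidablePred c]
    (f : α → γ → α) (g : β → γ → β) (a : α) (b : β) :
    l.foldl (fun acc p => if c p then acc else (f acc.1 p, g acc.2 p)) (a, b)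
    = (l.foldl (fun x p => if c p then x else f x p) a,
       l.foldl (fun y p => if c p then y else g y p) b) := by
  induction l generalizing a b with
  | nil => rfl
  | cons h t ih =>
    simp only [List.foldl_cons]
    by_cases hc : c h <;> simp [hc, ih]

-- a guarded loop is a loop over the filtered list
lemma pv_foldl_guard {α γ : Type} (l : List γ) (c : γ → Prop) [DecidablePred c]
    (f : α → γ → α) (a : α) :
    l.foldl (fun x p => if c p then x else f x p) a
    = (l.filter (fun p => !decide (c p))).foldl f a := by
  rw [List.foldl_filter]
  have : (fun (x : α) (p : γ) => if (!decide (c p)) = true then f x p else x)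
       = (fun (x : α) (p : γ) => if c p then x else f x p) := by
    funext x p
    by_cases h : c p <;> simp [h]
  rw [this]

-- two distinct list members with the same image force image-count ≥ 2
lemma pv_two_le_count {β γ : Type} [DecidableEq β] [DecidableEq γ] (L : List β) (f : β → γ)
    (x y : β) (hx : x ∈ L) (hy : y ∈ L) (hne : x ≠ y) (heq : f x = f y) :
    2 ≤ (L.map f).count (f x) := by
  have hperm : L.Perm (x :: L.erase x) := List.perm_cons_erase hx
  have h1 : (L.map f).count (f x) = ((x :: L.erase x).map f).count (f x) :=
    ((hperm.map f).count_eq (f x))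
  rw [h1]
  simp only [List.map_cons, List.count_cons_self]
  have hy' : y ∈ L.erase x := (List.mem_erase_of_ne (fun h => hne h.symm)).mpr hy
  have : f x ∈ (L.erase x).map f := by
    rw [heq]; exact List.mem_map_of_mem hy'
  have := List.count_pos_iff.mpr this
  omega

-- a dropped entry (timeslot with a single distinct value) has no key-sharers but its own copies
lemma pv_dropped (s : List (List Int × List Int)) (x : List Int × List Int)
    (hx : x ∈ s) (hk : pvKept s x = false) :
    s.countP (fun y => decide (pvKey y = pvKey x)) = s.count x := by
  have hlt : (((PySem.Set.ofList s).map pvSlot).count (pvSlot x) : Int) < 2 := by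
    simpa [pvKept] using hk
  rw [List.count_eq_countP]
  refine List.countP_congr (fun y hy => ?_)
  by_cases hxy : y = x
  · simp [hxy]
  · have : ¬ pvKey y = pvKey x := by
      intro hkey
      have hslot : pvSlot y = pvSlot x := by
        simp only [pvKey, Prod.mk.injEq] at hkey
        simpa [pvSlot] using hkey.2
      have hxm : x ∈ PySem.Set.ofList s := (PySem.Set.mem_ofList _ _).mpr hx
      have hym : y ∈ PySem.Set.ofList s := (PySem.Set.mem_ofList _ _).mpr hy
      have h2 : 2 ≤ ((PySem.Set.ofList s).map pvSlot).count (pvSlot x) := by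
        have := pv_two_le_count (PySem.Set.ofList s) pvSlot x y hxm hym
          (fun h => hxy h.symm) hslot.symm
        exact this
      omega
    simp [this, hxy]

-- a kept entry finds all its key-sharers among the kept entries
lemma pv_kept (s : List (List Int × List Int)) (x : List Int × List Int)
    (hkx : pvKept s x = true) :
    (s.filter (fun p => pvKept s p)).countP (fun y => decide (pvKey y = pvKey x))
    = s.countP (fun y => decide (pvKey y = pvKey x)) := by
  rw [List.countP_filter]
  refine List.countP_congr (fun y hy => ?_)
  by_cases hkey : pvKey y = pvKey x
  · have hslot : pvSlot y = pvSlot x := by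
      simp only [pvKey, Prod.mk.injEq] at hkey
      simpa [pvSlot] using hkey.2
    have : pvKept s y = true := by
      simpa [pvKept, hslot] using hkx
    simp [hkey, this]
  · simp [hkey]

-- dropping zero terms from a map-sum
lemma pv_sum_filter {β : Type} (l : List β) (c : β → Bool) (h : β → Int)
    (hz : ∀ x ∈ l, c x = false → h x = 0) :
    (l.map h).sum = ((l.filter c).map h).sum := by
  induction l with
  | nil => rfl
  | cons a t ih =>
    have ih' := ih (fun x hx => hz x (List.mem_cons_of_mem a hx))
    by_cases hc : c a
    · simp [hc, ih']
    · have : h a = 0 := hz a (List.mem_cons_self) (by simpa using hc)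
      simp [hc, ih', this]

-- if s has at most one distinct value, all members are equal
lemma pv_all_eq (s : List (List Int × List Int))
    (h : (PySem.Set.ofList s).length ≤ 1) :
    ∀ x ∈ s, ∀ y ∈ s, x = y := by
  intro x hx y hy
  have hxm : x ∈ PySem.Set.ofList s := (PySem.Set.mem_ofList _ _).mpr hx
  have hym : y ∈ PySem.Set.ofList s := (PySem.Set.mem_ofList _ _).mpr hy
  match hS : PySem.Set.ofList s with
  | [] => rw [hS] at hxm; cases hxm
  | [v] =>
    rw [hS] at hxm hym
    simp only [List.mem_singleton] at hxm hym
    rw [hxm, hym]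
  | v :: w :: r => rw [hS] at h; simp at h

-- B's value, characterized: the guarded key-group squares minus the guarded copy counts
lemma pv_B_char (s : List (List Int × List Int)) :
    hc_class_conflict_alt s
    = if (PySem.Set.ofList s).length ≤ 1 then 0
      else
        ((PySem.Set.ofList ((s.filter (fun p => pvKept s p)).map pvKey)).map
           (fun k => (((s.filter (fun p => pvKept s p)).map pvKey).count k : Int)
             * (((s.filter (fun p => pvKept s p)).map pvKey).count k : Int))).sum
        - ((s.filter (fun p => pvKept s p)).map (fun p => (s.count p : Int))).sum := by
  unfold hc_class_conflict_alt
  rw [PySem.Dict.foldl_insert_getD_add_one_eq_counter]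
  simp only [PySem.Dict.keys_counter]
  simp only [show ∀ p : List Int × List Int,
      (PySem.List.pyGetD p.1 0 0, PySem.List.pyGetD p.2 2 0) = pvKey p from fun _ => rfl]
  simp only [show ∀ p : List Int × List Int,
      PySem.List.pyGetD p.2 2 0 = pvSlot p from fun _ => rfl]
  rw [show List.foldl
        (fun (d : PySem.Dict Int Int) v => d.insert (pvSlot v) (d.getD (pvSlot v) 0 + 1))
        PySem.Dict.empty (PySem.Set.ofList s)
      = List.foldl (fun (d : PySem.Dict Int Int) t => d.insert t (d.getD t 0 + 1))
        PySem.Dict.empty ((PySem.Set.ofList s).map pvSlot) from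
    (List.foldl_map (f := pvSlot)
      (g := fun (d : PySem.Dict Int Int) t => d.insert t (d.getD t 0 + 1))
      (l := PySem.Set.ofList s) (init := PySem.Dict.empty)).symm]
  rw [PySem.Dict.foldl_insert_getD_add_one_eq_counter]
  simp only [PySem.Dict.getD_counter]
  rw [show (PySem.Dict.counter s).size = (PySem.Set.ofList s).length from by
    simp [PySem.Dict.size, PySem.Dict.items_counter]]
  rw [pv_foldl_if_prod s
      (c := fun p => ((List.count (pvSlot p) ((PySem.Set.ofList s).map pvSlot) : Int)) < 2)
      (f := fun (d : PySem.Dict (Int × Int) Int) p => d.insert (pvKey p) (d.getD (pvKey p) 0 + 1))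
      (g := fun (y : Int) p => y + (List.count p s : Int))]
  rw [pv_foldl_guard s
      (c := fun p => ((List.count (pvSlot p) ((PySem.Set.ofList s).map pvSlot) : Int)) < 2)
      (f := fun (d : PySem.Dict (Int × Int) Int) p => d.insert (pvKey p) (d.getD (pvKey p) 0 + 1))]
  rw [pv_foldl_guard s
      (c := fun p => ((List.count (pvSlot p) ((PySem.Set.ofList s).map pvSlot) : Int)) < 2)
      (f := fun (y : Int) p => y + (List.count p s : Int))]
  simp only [show (fun p => !decide ((((PySem.Set.ofList s).map pvSlot).count (pvSlot p) : Int) < 2))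
      = (fun p => pvKept s p) from rfl]
  rw [show List.foldl
        (fun (d : PySem.Dict (Int × Int) Int) p => d.insert (pvKey p) (d.getD (pvKey p) 0 + 1))
        PySem.Dict.empty (s.filter (fun p => pvKept s p))
      = List.foldl (fun (d : PySem.Dict (Int × Int) Int) k => d.insert k (d.getD k 0 + 1))
        PySem.Dict.empty ((s.filter (fun p => pvKept s p)).map pvKey) from
    (List.foldl_map (f := pvKey)
      (g := fun (d : PySem.Dict (Int × Int) Int) k => d.insert k (d.getD k 0 + 1))
      (l := s.filter (fun p => pvKept s p)) (init := PySem.Dict.empty)).symm]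
  rw [PySem.Dict.foldl_insert_getD_add_one_eq_counter]
  rw [PySem.List.foldl_add]
  simp only [PySem.Dict.values, PySem.Dict.items_counter, List.map_map]
  simp only [Function.comp_def]
  norm_num

theorem hc_class_conflict_spec : Claim_equal_hc_class_conflict := by
  intro s _ _
  unfold Spec_hc_class_conflict
  rw [pv_A_char, pv_B_char]
  by_cases hd : (PySem.Set.ofList s).length ≤ 1
  · simp only [hd, if_true]
    have hall := pv_all_eq s hd
    have hz : ∀ x ∈ s,
        (s.countP (fun p2 => decide (pvKey p2 = pvKey x) && (x != p2)) : Int) = 0 := by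
      intro x hx
      have : s.countP (fun p2 => decide (pvKey p2 = pvKey x) && (x != p2)) = 0 := by
        rw [List.countP_eq_zero]
        intro y hy
        have : x = y := hall x hx y hy
        simp [this]
      simp [this]
    rw [List.map_congr_left (fun x hx => hz x hx)]
    simp
  · simp only [hd, if_false]
    rw [List.map_congr_left (fun p1 _ => pv_pointwise s p1)]
    rw [pv_sum_filter s (fun p => pvKept s p)
        (fun x => (s.countP (fun p2 => decide (pvKey p2 = pvKey x)) : Int) - (s.count x : Int))
        (fun x hx hk => by
          show (↑(s.countP (fun p2 => decide (pvKey p2 = pvKey x))) : Int) - ↑(s.count x) = 0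
          rw [pv_dropped s x hx hk]; ring)]
    rw [List.map_congr_left (fun x hx => by
      have hkx : pvKept s x = true := (List.mem_filter.mp hx).2
      rw [← pv_kept s x hkx])]
    rw [pv_sum_sub]
    congr 1
    rw [pv_regroup ((s.filter (fun p => pvKept s p)).map pvKey)
        (fun k => (((s.filter (fun p => pvKept s p)).map pvKey).count k : Int))]
    rw [List.map_map]
    refine congrArg List.sum (List.map_congr_left (fun x _ => ?_))
    simp only [Function.comp_apply]
    exact_mod_cast congrArg (Nat.cast : Nat → Int)
      (pv_count_map (s.filter (fun p => pvKept s p)) x).symm
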